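-- pv_equiv track=rewrite | github.com/bernardopaulsen/courses | LearnCompletePython/Section10/125.py | reverse_second
-- ===== SOURCE A (Python) =====
-- def reverse_second(string: str) -> str:
--     l = []
--     i = 0
--     for s in string.split():
--         i += 1
--         if i%2:
--             l.append(s)
--         else:
--             l.append(s[::-1])
--     return ' '.join(l)
-- ===== SOURCE B (Python) =====
-- def reverse_second(string: str) -> str:
--     def go(ws):
--         if len(ws) < 2:
--             return ws
--         return [ws[0], ws[1][::-1]] + go(ws[2:])
--     return ' '.join(go(string.split()))
-- ===== Notes on version B (the rewrite author's own statement) =====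
-- stated objective: simpler
-- what changed: Replaces the parity counter with a single conditional loop by pair-wise recursion on the word list: keep the first word of each pair, reverse the second; no counter, no branch.
import Mathlib
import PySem

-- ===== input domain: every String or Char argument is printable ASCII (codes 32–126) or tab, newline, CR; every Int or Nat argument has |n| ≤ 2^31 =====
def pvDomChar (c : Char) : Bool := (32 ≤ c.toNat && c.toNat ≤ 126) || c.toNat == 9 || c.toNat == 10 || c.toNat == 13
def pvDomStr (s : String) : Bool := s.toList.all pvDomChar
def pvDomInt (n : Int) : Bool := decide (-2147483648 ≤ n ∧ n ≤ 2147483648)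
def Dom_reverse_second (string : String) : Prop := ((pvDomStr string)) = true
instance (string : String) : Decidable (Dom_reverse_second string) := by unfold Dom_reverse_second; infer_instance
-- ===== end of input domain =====

-- B replaces A's parity counter and branch by pair-wise recursion on the word list (simpler decomposition).

-- ===== PORT A =====
-- the for-loop of A, state = (counter i, accumulator l)
def pvLoopA : List String → Int → List String → List String
  | [], _, l => l
  | s :: rest, i, l =>
    let i' := i + 1
    if PySem.Int.mod i' 2 ≠ 0 then
      pvLoopA rest i' (l ++ [s])
    else
      pvLoopA rest i' (l ++ [(PySem.Str.slice? s none none (-1)).getD ""])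

def reverse_second (string : String) : String :=
  PySem.Str.join " " (pvLoopA (PySem.Str.split₀ string) 0 [])

-- ===== PORT B =====
-- Source B's go: keep the first word of each pair, reverse the second
def pvGoB : List String → List String
  | a :: b :: rest => a :: (PySem.Str.slice? b none none (-1)).getD "" :: pvGoB rest
  | ws => ws

def reverse_second_alt (string : String) : String :=
  PySem.Str.join " " (pvGoB (PySem.Str.split₀ string))

-- ===== PRECONDITION & SPEC =====
def Spec_reverse_second (string : String) (out : String) : Prop := out = reverse_second_alt string
instance (string : String) (out : String) : Decidable (Spec_reverse_second string out) := by unfold Spec_reverse_second; infer_instance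

-- ===== CLAIM (what is proved, stated in full; the proofs are below) =====
def Claim_equal_reverse_second : Prop := ∀ (string : String), Dom_reverse_second string → Spec_reverse_second string (reverse_second string)

-- ===== LEMMAS AND PROOFS =====
theorem pvLoopA_eq (ws : List String) : ∀ (i : Int) (l : List String),
    PySem.Int.mod i 2 = 0 → pvLoopA ws i l = l ++ pvGoB ws := by
  induction ws using pvGoB.induct with
  | case1 a b rest ih =>
    intro i l hi
    have h1 : PySem.Int.mod (i + 1) 2 = 1 := by
      simp [PySem.Int.mod, Int.fmod_eq_emod] at hi ⊢; omega
    have h2 : PySem.Int.mod (i + 1 + 1) 2 = 0 := by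
      simp [PySem.Int.mod, Int.fmod_eq_emod] at hi ⊢; omega
    simp only [pvLoopA, h1, h2]
    norm_num
    simp [ih _ _ h2, pvGoB]
  | case2 ws h =>
    rcases ws with _ | ⟨a, tail⟩
    · intro i l _; simp [pvLoopA, pvGoB]
    · rcases tail with _ | ⟨b, rest⟩
      · intro i l hi
        have h1 : PySem.Int.mod (i + 1) 2 = 1 := by
          simp [PySem.Int.mod, Int.fmod_eq_emod] at hi ⊢; omega
        simp only [pvLoopA, h1]
        norm_num
        simp [pvGoB]
      · exact absurd rfl (fun e => h a b rest e)

-- ===== VERDICT (by name: the statement is the Claim_ definition above) =====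
theorem reverse_second_spec : Claim_equal_reverse_second := by
  intro string _
  unfold Spec_reverse_second reverse_second reverse_second_alt
  rw [pvLoopA_eq _ 0 [] (by decide)]
  simp
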